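-- pv_equiv track=rewrite | github.com/Sumedha494/DSA-Questions | minimum_operations_to_make_string_equal.py | minOperations_with_steps
-- ===== SOURCE A (Python) =====
-- def minOperations_with_steps(s1, s2):
--     """
--     Return minimum operations and the actual steps
--     """
--     m, n = len(s1), len(s2)
--
--     dp = [[0] * (n + 1) for _ in range(m + 1)]
--
--     for i in range(m + 1):
--         dp[i][0] = i
--     for j in range(n + 1):
--         dp[0][j] = j
--
--     for i in range(1, m + 1):
--         for j in range(1, n + 1):
--             if s1[i - 1] == s2[j - 1]:
--                 dp[i][j] = dp[i - 1][j - 1]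
--             else:
--                 dp[i][j] = 1 + min(
--                     dp[i - 1][j],
--                     dp[i][j - 1],
--                     dp[i - 1][j - 1]
--                 )
--
--     # Backtrack to find operations
--     operations = []
--     i, j = m, n
--
--     while i > 0 or j > 0:
--         if i > 0 and j > 0 and s1[i - 1] == s2[j - 1]:
--             i -= 1
--             j -= 1
--         elif i > 0 and j > 0 and dp[i][j] == dp[i - 1][j - 1] + 1:
--             operations.append("Replace '" + s1[i - 1] + "' with '" + s2[j - 1] + "'")
--             i -= 1
--             j -= 1
--         elif j > 0 and dp[i][j] == dp[i][j - 1] + 1: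
--             operations.append("Insert '" + s2[j - 1] + "'")
--             j -= 1
--         elif i > 0 and dp[i][j] == dp[i - 1][j] + 1:
--             operations.append("Delete '" + s1[i - 1] + "'")
--             i -= 1
--
--     operations.reverse()
--     return dp[m][n], operations
-- ===== SOURCE B (Python) =====
-- def minOperations_with_steps(s1, s2):
--     """
--     Return minimum operations and the actual steps.
--     Alternative decomposition: top-down memoized dist(i, j) over prefix
--     lengths (computed with an explicit work stack, no 2-D table), and the
--     same backtracking loop calling dist instead of indexing an array.
--     """
--     m, n = len(s1), len(s2)
--     memo = {}
--
--     def dist(i, j):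
--         stack = [(i, j)]
--         while stack:
--             a, b = stack[-1]
--             if (a, b) in memo:
--                 stack.pop()
--             elif a == 0:
--                 memo[(a, b)] = b
--                 stack.pop()
--             elif b == 0:
--                 memo[(a, b)] = a
--                 stack.pop()
--             elif s1[a - 1] == s2[b - 1]:
--                 if (a - 1, b - 1) in memo:
--                     memo[(a, b)] = memo[(a - 1, b - 1)]
--                     stack.pop()
--                 else:
--                     stack.append((a - 1, b - 1))
--             else:
--                 k1, k2, k3 = (a - 1, b), (a, b - 1), (a - 1, b - 1)
--                 if k1 in memo and k2 in memo and k3 in memo: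
--                     memo[(a, b)] = 1 + min(memo[k1], memo[k2], memo[k3])
--                     stack.pop()
--                 else:
--                     if k1 not in memo:
--                         stack.append(k1)
--                     if k2 not in memo:
--                         stack.append(k2)
--                     if k3 not in memo:
--                         stack.append(k3)
--         return memo[(i, j)]
--
--     operations = []
--     i, j = m, n
--     while i > 0 or j > 0:
--         if i > 0 and j > 0 and s1[i - 1] == s2[j - 1]:
--             i -= 1
--             j -= 1
--         elif i > 0 and j > 0 and dist(i, j) == dist(i - 1, j - 1) + 1:
--             operations.append("Replace '" + s1[i - 1] + "' with '" + s2[j - 1] + "'")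
--             i -= 1
--             j -= 1
--         elif j > 0 and dist(i, j) == dist(i, j - 1) + 1:
--             operations.append("Insert '" + s2[j - 1] + "'")
--             j -= 1
--         elif i > 0 and dist(i, j) == dist(i - 1, j) + 1:
--             operations.append("Delete '" + s1[i - 1] + "'")
--             i -= 1
--     operations.reverse()
--     return dist(m, n), operations
-- ===== Notes on version B (the rewrite author's own statement) =====
-- stated objective: alternative
-- what changed: Replaces the bottom-up (m+1)x(n+1) DP table with a top-down memoized dist(i,j) over prefix lengths (driven by an explicit work stack, so only needed subproblems are stored in a dict), and the backtracking loop calls dist instead of indexing the table.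
import Mathlib
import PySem

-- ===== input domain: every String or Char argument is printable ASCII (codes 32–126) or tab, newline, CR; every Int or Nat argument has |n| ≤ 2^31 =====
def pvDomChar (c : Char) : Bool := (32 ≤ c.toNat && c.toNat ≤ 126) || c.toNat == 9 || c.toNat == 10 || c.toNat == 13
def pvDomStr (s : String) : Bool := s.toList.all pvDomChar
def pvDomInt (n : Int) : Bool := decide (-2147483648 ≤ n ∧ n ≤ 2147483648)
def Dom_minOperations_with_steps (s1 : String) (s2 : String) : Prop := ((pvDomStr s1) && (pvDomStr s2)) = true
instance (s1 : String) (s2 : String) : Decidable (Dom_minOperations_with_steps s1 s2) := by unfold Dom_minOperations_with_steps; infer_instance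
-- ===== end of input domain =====

-- B replaces A's bottom-up DP table by a top-down memoized dist(i,j) recursion; same
-- backtracking order, so the returned count and step strings are identical (alternative
-- decomposition, no speed claim).

-- ===== PORT A =====
-- 2-D list access/update; in A every index used is in range, so getD/set are exact.
def pvGet2 (dp : List (List Int)) (i j : Nat) : Int := (dp.getD i []).getD j 0

def pvSet2 (dp : List (List Int)) (i j : Nat) (v : Int) : List (List Int) :=
  dp.set i ((dp.getD i []).set j v)

-- body of A's inner dp loop (the value written into dp[i][j])
def pvCellA (l1 l2 : List Char) (dp : List (List Int)) (i j : Nat) : Int :=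
  if l1.getD (i-1) ' ' = l2.getD (j-1) ' ' then pvGet2 dp (i-1) (j-1)
  else 1 + min (min (pvGet2 dp (i-1) j) (pvGet2 dp i (j-1))) (pvGet2 dp (i-1) (j-1))

-- the dp table exactly as A builds it: zero-filled, first column, first row, main loops
def pvTableA (l1 l2 : List Char) : List (List Int) :=
  let m := l1.length; let n := l2.length
  let dp0 := List.replicate (m+1) (List.replicate (n+1) (0:Int))
  let dp1 := (List.range (m+1)).foldl (fun dp i => pvSet2 dp i 0 (i:Int)) dp0
  let dp2 := (List.range (n+1)).foldl (fun dp j => pvSet2 dp 0 j (j:Int)) dp1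
  (List.range' 1 m).foldl (fun dp i =>
    (List.range' 1 n).foldl (fun dp j => pvSet2 dp i j (pvCellA l1 l2 dp i j)) dp) dp2

def pvRepOp (l1 l2 : List Char) (i j : Nat) : String :=
  "Replace '" ++ String.singleton (l1.getD (i-1) ' ') ++ "' with '" ++ String.singleton (l2.getD (j-1) ' ') ++ "'"

def pvInsOp (l2 : List Char) (j : Nat) : String :=
  "Insert '" ++ String.singleton (l2.getD (j-1) ' ') ++ "'"

def pvDelOp (l1 : List Char) (i : Nat) : String :=
  "Delete '" ++ String.singleton (l1.getD (i-1) ' ') ++ "'"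

-- A's backtracking while-loop; fuel m+n bounds the iterations (each one lowers i+j).
def pvBtA (l1 l2 : List Char) (dp : List (List Int)) : Nat → Nat → Nat → List String → List String
  | 0, _, _, acc => acc
  | fuel+1, i, j, acc =>
    if i > 0 ∨ j > 0 then
      if i > 0 ∧ j > 0 ∧ l1.getD (i-1) ' ' = l2.getD (j-1) ' ' then
        pvBtA l1 l2 dp fuel (i-1) (j-1) acc
      else if i > 0 ∧ j > 0 ∧ pvGet2 dp i j = pvGet2 dp (i-1) (j-1) + 1 then
        pvBtA l1 l2 dp fuel (i-1) (j-1) (acc ++ [pvRepOp l1 l2 i j])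
      else if j > 0 ∧ pvGet2 dp i j = pvGet2 dp i (j-1) + 1 then
        pvBtA l1 l2 dp fuel i (j-1) (acc ++ [pvInsOp l2 j])
      else if i > 0 ∧ pvGet2 dp i j = pvGet2 dp (i-1) j + 1 then
        pvBtA l1 l2 dp fuel (i-1) j (acc ++ [pvDelOp l1 i])
      else pvBtA l1 l2 dp fuel i j acc  -- unreachable: some branch always fires
    else acc

def minOperations_with_steps (s1 : String) (s2 : String) : Int × List String :=
  let l1 := s1.toList; let l2 := s2.toList
  let m := l1.length; let n := l2.length
  let dp := pvTableA l1 l2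
  let ops := pvBtA l1 l2 dp (m+n) m n []
  (pvGet2 dp m n, ops.reverse)

-- ===== PORT B =====
-- B's dist(i,j): top-down memoized edit distance over prefix lengths.  The memo dict is
-- threaded explicitly (Source B drives the same recurrence with an explicit work stack only to
-- sidestep Python's recursion limit; case order and memo contents are identical).  The
-- elif conditions of Source B call dist lazily; the same (pure) values are fetched here in
-- order, growing the memo the same way on every taken branch.
def pvDistM (l1 l2 : List Char) (i j : Nat) (memo : PySem.Dict (Nat × Nat) Int) :
    Int × PySem.Dict (Nat × Nat) Int :=
  match memo.get? (i, j) with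
  | some v => (v, memo)
  | none =>
    if h1 : i = 0 then ((j : Int), memo.insert (i, j) (j : Int))
    else if h2 : j = 0 then ((i : Int), memo.insert (i, j) (i : Int))
    else if l1.getD (i-1) ' ' = l2.getD (j-1) ' ' then
      let r := pvDistM l1 l2 (i-1) (j-1) memo
      (r.1, r.2.insert (i, j) r.1)
    else
      let ra := pvDistM l1 l2 (i-1) j memo
      let rb := pvDistM l1 l2 i (j-1) ra.2
      let rc := pvDistM l1 l2 (i-1) (j-1) rb.2
      let v := 1 + min (min ra.1 rb.1) rc.1
      (v, rc.2.insert (i, j) v)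
  termination_by (i, j)
  decreasing_by all_goals omega

-- B's backtracking while-loop, calling the memoized dist (shared memo) instead of a table.
def pvBtB (l1 l2 : List Char) : Nat → Nat → Nat → List String → PySem.Dict (Nat × Nat) Int →
    List String × PySem.Dict (Nat × Nat) Int
  | 0, _, _, acc, memo => (acc, memo)
  | fuel+1, i, j, acc, memo =>
    if i > 0 ∨ j > 0 then
      if i > 0 ∧ j > 0 ∧ l1.getD (i-1) ' ' = l2.getD (j-1) ' ' then
        pvBtB l1 l2 fuel (i-1) (j-1) acc memo
      else
        let r1 := pvDistM l1 l2 i j memo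
        let r2 := pvDistM l1 l2 (i-1) (j-1) r1.2
        let r3 := pvDistM l1 l2 i (j-1) r2.2
        let r4 := pvDistM l1 l2 (i-1) j r3.2
        if i > 0 ∧ j > 0 ∧ r1.1 = r2.1 + 1 then
          pvBtB l1 l2 fuel (i-1) (j-1) (acc ++ [pvRepOp l1 l2 i j]) r4.2
        else if j > 0 ∧ r1.1 = r3.1 + 1 then
          pvBtB l1 l2 fuel i (j-1) (acc ++ [pvInsOp l2 j]) r4.2
        else if i > 0 ∧ r1.1 = r4.1 + 1 then
          pvBtB l1 l2 fuel (i-1) j (acc ++ [pvDelOp l1 i]) r4.2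
        else pvBtB l1 l2 fuel i j acc r4.2  -- unreachable: some branch always fires
    else (acc, memo)

def minOperations_with_steps_alt (s1 : String) (s2 : String) : Int × List String :=
  let l1 := s1.toList; let l2 := s2.toList
  let m := l1.length; let n := l2.length
  let r := pvBtB l1 l2 (m+n) m n [] PySem.Dict.empty
  let d := pvDistM l1 l2 m n r.2
  (d.1, r.1.reverse)

-- ===== PRECONDITION & SPEC =====
def Spec_minOperations_with_steps (s1 : String) (s2 : String) (out : Int × List String) : Prop := out = minOperations_with_steps_alt s1 s2
instance (s1 : String) (s2 : String) (out : Int × List String) : Decidable (Spec_minOperations_with_steps s1 s2 out) := by unfold Spec_minOperations_with_steps; infer_instance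

-- ===== CLAIM (what is proved, stated in full; the proofs are below) =====
def Claim_equal_minOperations_with_steps : Prop := ∀ (s1 : String) (s2 : String), Dom_minOperations_with_steps s1 s2 → Spec_minOperations_with_steps s1 s2 (minOperations_with_steps s1 s2)

-- ===== LEMMAS AND PROOFS =====

-- proof-layer spec: the naive edit-distance recursion (used only in the lemmas below)
def pvDist (l1 l2 : List Char) (i j : Nat) : Int :=
  if i = 0 then (j : Int)
  else if j = 0 then (i : Int)
  else if l1.getD (i-1) ' ' = l2.getD (j-1) ' ' then pvDist l1 l2 (i-1) (j-1)
  else 1 + min (min (pvDist l1 l2 (i-1) j) (pvDist l1 l2 i (j-1))) (pvDist l1 l2 (i-1) (j-1))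
  termination_by (i, j)
  decreasing_by all_goals omega

def pvShape (dp : List (List Int)) (m n : Nat) : Prop :=
  dp.length = m+1 ∧ ∀ r ∈ dp, r.length = n+1

theorem pvGet2_set2_ne {dp : List (List Int)} {i j i' j' : Nat} {v : Int}
    (h : i' ≠ i ∨ j' ≠ j) :
    pvGet2 (pvSet2 dp i j v) i' j' = pvGet2 dp i' j' := by
  unfold pvGet2 pvSet2
  rcases eq_or_ne i' i with rfl | hne
  · have hj : j' ≠ j := h.elim (fun h => absurd rfl h) id
    simp only [List.getD_eq_getElem?_getD, List.getElem?_set]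
    by_cases hlen : i' < dp.length
    · simp [hlen, Ne.symm hj]
    · simp [hlen]
  · simp [List.getD_eq_getElem?_getD, Ne.symm hne]

theorem pvGet2_set2_self {dp : List (List Int)} {i j : Nat} {v : Int}
    (hi : i < dp.length) (hj : j < (dp.getD i []).length) :
    pvGet2 (pvSet2 dp i j v) i j = v := by
  unfold pvGet2 pvSet2
  simp only [List.getD_eq_getElem?_getD, List.getElem?_set, hi, if_pos]
  simp [List.getD_eq_getElem?_getD] at hj ⊢
  simp [hj]

theorem pvShape_set2 {dp : List (List Int)} {m n i j : Nat} {v : Int}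
    (h : pvShape dp m n) (hi : i ≤ m) : pvShape (pvSet2 dp i j v) m n := by
  obtain ⟨h1, h2⟩ := h
  constructor
  · simpa [pvSet2] using h1
  · intro r hr
    rcases List.mem_or_eq_of_mem_set hr with hr | rfl
    · exact h2 r hr
    · rw [List.length_set]
      have hilen : i < dp.length := by omega
      have : dp.getD i [] = dp[i] := List.getD_eq_getElem dp [] hilen
      rw [this]
      exact h2 _ (List.getElem_mem hilen)

theorem pvRow_len {dp : List (List Int)} {m n i : Nat} (h : pvShape dp m n) (hi : i ≤ m) :
    (dp.getD i []).length = n+1 := by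
  have hilen : i < dp.length := by rw [h.1]; omega
  rw [List.getD_eq_getElem dp [] hilen]
  exact h.2 _ (List.getElem_mem hilen)

theorem pvGet2_replicate (m n i j : Nat) :
    pvGet2 (List.replicate (m+1) (List.replicate (n+1) (0:Int))) i j = 0 := by
  unfold pvGet2
  simp only [List.getD_eq_getElem?_getD, List.getElem?_replicate]
  by_cases hi : i < m+1 <;> by_cases hj : j < n+1 <;> simp [hi, hj]

theorem pvFoldCol (m n : Nat) : ∀ k, k ≤ m+1 → ∀ dp : List (List Int), pvShape dp m n →
    pvShape ((List.range k).foldl (fun dp i => pvSet2 dp i 0 (i:Int)) dp) m n ∧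
    ∀ i' j', j' ≤ n →
      pvGet2 ((List.range k).foldl (fun dp i => pvSet2 dp i 0 (i:Int)) dp) i' j' =
        if i' < k ∧ j' = 0 then (i':Int) else pvGet2 dp i' j' := by
  intro k
  induction k with
  | zero => intro _ dp hsh; refine ⟨hsh, ?_⟩; intro i' j' _; simp
  | succ k ih =>
    intro hk dp hsh
    obtain ⟨ihs, ihv⟩ := ih (by omega) dp hsh
    rw [List.range_succ, List.foldl_append]
    refine ⟨pvShape_set2 ihs (by omega), ?_⟩
    intro i' j' hj'
    simp only [List.foldl_cons, List.foldl_nil]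
    by_cases hc : i' = k ∧ j' = 0
    · obtain ⟨rfl, rfl⟩ := hc
      rw [pvGet2_set2_self (by rw [ihs.1]; omega) (by rw [pvRow_len ihs (by omega)]; omega)]
      rw [if_pos (by omega)]
    · have hne : i' ≠ k ∨ j' ≠ 0 := by omega
      rw [pvGet2_set2_ne hne, ihv i' j' hj']
      by_cases h1 : i' < k ∧ j' = 0
      · rw [if_pos h1, if_pos (by omega)]
      · rw [if_neg h1, if_neg (by omega)]

theorem pvFoldRow (m n : Nat) : ∀ k, k ≤ n+1 → ∀ dp : List (List Int), pvShape dp m n →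
    pvShape ((List.range k).foldl (fun dp j => pvSet2 dp 0 j (j:Int)) dp) m n ∧
    ∀ i' j',
      pvGet2 ((List.range k).foldl (fun dp j => pvSet2 dp 0 j (j:Int)) dp) i' j' =
        if i' = 0 ∧ j' < k then (j':Int) else pvGet2 dp i' j' := by
  intro k
  induction k with
  | zero => intro _ dp hsh; refine ⟨hsh, ?_⟩; intro i' j'; simp
  | succ k ih =>
    intro hk dp hsh
    obtain ⟨ihs, ihv⟩ := ih (by omega) dp hsh
    rw [List.range_succ, List.foldl_append]
    refine ⟨pvShape_set2 ihs (by omega), ?_⟩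
    intro i' j'
    simp only [List.foldl_cons, List.foldl_nil]
    by_cases hc : i' = 0 ∧ j' = k
    · obtain ⟨rfl, rfl⟩ := hc
      rw [pvGet2_set2_self (by rw [ihs.1]; omega) (by rw [pvRow_len ihs (by omega)]; omega)]
      rw [if_pos (by omega)]
    · have hne : i' ≠ 0 ∨ j' ≠ k := by omega
      rw [pvGet2_set2_ne hne, ihv i' j']
      by_cases h1 : i' = 0 ∧ j' < k
      · rw [if_pos h1, if_pos (by omega)]
      · rw [if_neg h1, if_neg (by omega)]

theorem pvDist_zero_left (l1 l2 : List Char) (j : Nat) : pvDist l1 l2 0 j = j := by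
  rw [pvDist]; simp

theorem pvDist_zero_right (l1 l2 : List Char) (i : Nat) : pvDist l1 l2 i 0 = i := by
  rw [pvDist]; split_ifs <;> simp_all

theorem pvFoldInner (l1 l2 : List Char) (i : Nat) (hi1 : 1 ≤ i) (hi2 : i ≤ l1.length) :
    ∀ k, k ≤ l2.length → ∀ dp : List (List Int), pvShape dp l1.length l2.length →
    (∀ i' ≤ l1.length, ∀ j' ≤ l2.length, pvGet2 dp i' j' =
        if i' = 0 ∨ j' = 0 ∨ i' < i then pvDist l1 l2 i' j' else 0) →
    pvShape ((List.range' 1 k).foldl (fun dp j => pvSet2 dp i j (pvCellA l1 l2 dp i j)) dp) l1.length l2.length ∧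
    ∀ i' ≤ l1.length, ∀ j' ≤ l2.length,
      pvGet2 ((List.range' 1 k).foldl (fun dp j => pvSet2 dp i j (pvCellA l1 l2 dp i j)) dp) i' j' =
        if i' = 0 ∨ j' = 0 ∨ i' < i ∨ (i' = i ∧ j' ≤ k) then pvDist l1 l2 i' j' else 0 := by
  intro k
  induction k with
  | zero =>
    intro _ dp hsh hv
    refine ⟨hsh, ?_⟩
    intro i' hI j' hJ
    rw [List.range'_zero, List.foldl_nil, hv i' hI j' hJ]
    by_cases hc : i' = 0 ∨ j' = 0 ∨ i' < i
    · rw [if_pos hc, if_pos (by omega)]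
    · rw [if_neg hc, if_neg (by omega)]
  | succ k ih =>
    intro hk dp hsh hv
    obtain ⟨ihs, ihv⟩ := ih (by omega) dp hsh hv
    rw [List.range'_concat, List.foldl_append]
    simp only [one_mul]
    set G := (List.range' 1 k).foldl (fun dp j => pvSet2 dp i j (pvCellA l1 l2 dp i j)) dp with hG
    refine ⟨pvShape_set2 ihs hi2, ?_⟩
    intro i' hI j' hJ
    simp only [List.foldl_cons, List.foldl_nil]
    have hcell : pvCellA l1 l2 G i (1+k) = pvDist l1 l2 i (1+k) := by
      unfold pvCellA
      have e1 : pvGet2 G (i-1) (1+k-1) = pvDist l1 l2 (i-1) (1+k-1) := by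
        rw [ihv (i-1) (by omega) (1+k-1) (by omega), if_pos (by omega)]
      have e2 : pvGet2 G (i-1) (1+k) = pvDist l1 l2 (i-1) (1+k) := by
        rw [ihv (i-1) (by omega) (1+k) (by omega), if_pos (by omega)]
      have e3 : pvGet2 G i (1+k-1) = pvDist l1 l2 i (1+k-1) := by
        rw [ihv i (by omega) (1+k-1) (by omega), if_pos (by omega)]
      rw [e1, e2, e3]
      conv_rhs => rw [pvDist]
      rw [if_neg (show ¬ (i = 0) from by omega), if_neg (show ¬ (1+k = 0) from by omega)]
    by_cases hc : i' = i ∧ j' = 1+k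
    · obtain ⟨rfl, rfl⟩ := hc
      rw [pvGet2_set2_self (by rw [ihs.1]; omega) (by rw [pvRow_len ihs hi2]; omega)]
      rw [hcell, if_pos (by omega)]
    · have hne : i' ≠ i ∨ j' ≠ 1+k := by omega
      rw [pvGet2_set2_ne hne, ihv i' hI j' hJ]
      by_cases h1 : i' = 0 ∨ j' = 0 ∨ i' < i ∨ (i' = i ∧ j' ≤ k)
      · rw [if_pos h1, if_pos (by omega)]
      · rw [if_neg h1, if_neg (by omega)]

theorem pvFoldOuter (l1 l2 : List Char) :
    ∀ r, r ≤ l1.length → ∀ dp : List (List Int), pvShape dp l1.length l2.length →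
    (∀ i' ≤ l1.length, ∀ j' ≤ l2.length, pvGet2 dp i' j' =
        if i' = 0 ∨ j' = 0 then pvDist l1 l2 i' j' else 0) →
    pvShape ((List.range' 1 r).foldl (fun dp i =>
        (List.range' 1 l2.length).foldl (fun dp j => pvSet2 dp i j (pvCellA l1 l2 dp i j)) dp) dp) l1.length l2.length ∧
    ∀ i' ≤ l1.length, ∀ j' ≤ l2.length,
      pvGet2 ((List.range' 1 r).foldl (fun dp i =>
          (List.range' 1 l2.length).foldl (fun dp j => pvSet2 dp i j (pvCellA l1 l2 dp i j)) dp) dp) i' j' =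
        if i' = 0 ∨ j' = 0 ∨ i' ≤ r then pvDist l1 l2 i' j' else 0 := by
  intro r
  induction r with
  | zero =>
    intro _ dp hsh hv
    refine ⟨by simpa using hsh, ?_⟩
    intro i' hI j' hJ
    rw [List.range'_zero, List.foldl_nil, hv i' hI j' hJ]
    by_cases hc : i' = 0 ∨ j' = 0
    · rw [if_pos hc, if_pos (by omega)]
    · rw [if_neg hc, if_neg (by omega)]
  | succ r ih =>
    intro hr dp hsh hv
    obtain ⟨ihs, ihv⟩ := ih (by omega) dp hsh hv
    rw [List.range'_concat, List.foldl_append]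
    simp only [one_mul, List.foldl_cons, List.foldl_nil]
    have hpre : ∀ i' ≤ l1.length, ∀ j' ≤ l2.length,
        pvGet2 ((List.range' 1 r).foldl (fun dp i =>
          (List.range' 1 l2.length).foldl (fun dp j => pvSet2 dp i j (pvCellA l1 l2 dp i j)) dp) dp) i' j' =
        if i' = 0 ∨ j' = 0 ∨ i' < 1+r then pvDist l1 l2 i' j' else 0 := by
      intro i' hI j' hJ
      rw [ihv i' hI j' hJ]
      by_cases hc : i' = 0 ∨ j' = 0 ∨ i' ≤ r
      · rw [if_pos hc, if_pos (by omega)]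
      · rw [if_neg hc, if_neg (by omega)]
    obtain ⟨hs2, hv2⟩ := pvFoldInner l1 l2 (1+r) (by omega) (by omega) l2.length le_rfl _ ihs hpre
    refine ⟨hs2, ?_⟩
    intro i' hI j' hJ
    rw [hv2 i' hI j' hJ]
    by_cases hc : i' = 0 ∨ j' = 0 ∨ i' < 1+r ∨ (i' = 1+r ∧ j' ≤ l2.length)
    · rw [if_pos hc, if_pos (by omega)]
    · rw [if_neg hc, if_neg (by omega)]

theorem pvTable_eq_dist (l1 l2 : List Char) :
    ∀ i ≤ l1.length, ∀ j ≤ l2.length,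
      pvGet2 (pvTableA l1 l2) i j = pvDist l1 l2 i j := by
  intro i hi j hj
  unfold pvTableA
  simp only
  have hsh0 : pvShape (List.replicate (l1.length+1) (List.replicate (l2.length+1) (0:Int))) l1.length l2.length := by
    constructor
    · simp
    · intro r hr
      rw [List.eq_of_mem_replicate hr]
      simp
  obtain ⟨hsh1, hv1⟩ := pvFoldCol l1.length l2.length (l1.length+1) le_rfl _ hsh0
  obtain ⟨hsh2, hv2⟩ := pvFoldRow l1.length l2.length (l2.length+1) le_rfl _ hsh1
  have hinit : ∀ i' ≤ l1.length, ∀ j' ≤ l2.length,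
      pvGet2 ((List.range (l2.length+1)).foldl (fun dp j => pvSet2 dp 0 j (j:Int))
        ((List.range (l1.length+1)).foldl (fun dp i => pvSet2 dp i 0 (i:Int))
          (List.replicate (l1.length+1) (List.replicate (l2.length+1) (0:Int))))) i' j' =
      if i' = 0 ∨ j' = 0 then pvDist l1 l2 i' j' else 0 := by
    intro i' hI j' hJ
    rw [hv2 i' j', hv1 i' j' hJ, pvGet2_replicate]
    by_cases h0 : i' = 0
    · subst h0
      rw [if_pos (by omega), if_pos (by omega), pvDist_zero_left]
    · rw [if_neg (by omega)]
      by_cases h1 : j' = 0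
      · subst h1
        rw [if_pos (by omega), if_pos (by omega), pvDist_zero_right]
      · rw [if_neg (by omega), if_neg (by omega)]
  obtain ⟨_, hv⟩ := pvFoldOuter l1 l2 l1.length le_rfl _ hsh2 hinit
  rw [hv i hi j hj, if_pos (by omega)]

def pvGood (l1 l2 : List Char) (memo : PySem.Dict (Nat × Nat) Int) : Prop :=
  ∀ i j v, memo.get? (i, j) = some v → v = pvDist l1 l2 i j

theorem pvGood_insert {l1 l2 : List Char} {memo : PySem.Dict (Nat × Nat) Int} {i j : Nat} {v : Int}
    (h : pvGood l1 l2 memo) (hv : v = pvDist l1 l2 i j) :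
    pvGood l1 l2 (memo.insert (i, j) v) := by
  intro i' j' v' h'
  rw [PySem.Dict.get?_insert] at h'
  by_cases he : (i', j') = (i, j)
  · rw [if_pos he] at h'
    obtain ⟨rfl, rfl⟩ := Prod.mk.injEq .. ▸ he
    cases h'; exact hv
  · rw [if_neg he] at h'
    exact h i' j' v' h'

theorem pvDistM_good (l1 l2 : List Char) :
    ∀ N, ∀ i j, i + j ≤ N → ∀ memo, pvGood l1 l2 memo →
      (pvDistM l1 l2 i j memo).1 = pvDist l1 l2 i j ∧
      pvGood l1 l2 (pvDistM l1 l2 i j memo).2 := by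
  intro N
  induction N with
  | zero =>
    intro i j hN memo hG
    have hi : i = 0 := by omega
    have hj : j = 0 := by omega
    subst hi; subst hj
    rw [pvDistM]
    cases hm : memo.get? (0, 0) with
    | some v =>
      exact ⟨hG 0 0 v hm, hG⟩
    | none =>
      rw [pvDist]
      exact ⟨by simp, pvGood_insert hG (by rw [pvDist]; simp)⟩
  | succ N ihN =>
    intro i j hN memo hG
    rw [pvDistM]
    cases hm : memo.get? (i, j) with
    | some v =>
      exact ⟨hG i j v hm, hG⟩
    | none =>
      by_cases h1 : i = 0
      · subst h1
        rw [dif_pos rfl]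
        refine ⟨by rw [pvDist_zero_left], pvGood_insert hG (by rw [pvDist_zero_left])⟩
      · by_cases h2 : j = 0
        · subst h2
          rw [dif_neg h1, dif_pos rfl]
          refine ⟨by rw [pvDist_zero_right], pvGood_insert hG (by rw [pvDist_zero_right])⟩
        · rw [dif_neg h1, dif_neg h2]
          by_cases h3 : l1.getD (i-1) ' ' = l2.getD (j-1) ' '
          · simp only [if_pos h3]
            obtain ⟨e1, g1⟩ := ihN (i-1) (j-1) (by omega) memo hG
            constructor
            · rw [e1]
              conv_rhs => rw [pvDist]
              rw [if_neg h1, if_neg h2, if_pos h3]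
            · exact pvGood_insert g1 (by
                rw [e1]
                conv_rhs => rw [pvDist]
                rw [if_neg h1, if_neg h2, if_pos h3])
          · simp only [if_neg h3]
            obtain ⟨e1, g1⟩ := ihN (i-1) j (by omega) memo hG
            obtain ⟨e2, g2⟩ := ihN i (j-1) (by omega) _ g1
            obtain ⟨e3, g3⟩ := ihN (i-1) (j-1) (by omega) _ g2
            have hv : 1 + min (min (pvDistM l1 l2 (i-1) j memo).1
                (pvDistM l1 l2 i (j-1) (pvDistM l1 l2 (i-1) j memo).2).1)
                (pvDistM l1 l2 (i-1) (j-1) (pvDistM l1 l2 i (j-1) (pvDistM l1 l2 (i-1) j memo).2).2).1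
                = pvDist l1 l2 i j := by
              rw [e1, e2, e3]
              conv_rhs => rw [pvDist]
              rw [if_neg h1, if_neg h2, if_neg h3]
            exact ⟨hv, pvGood_insert g3 hv⟩

theorem pvBt_eq (l1 l2 : List Char) (T : List (List Int))
    (htab : ∀ i ≤ l1.length, ∀ j ≤ l2.length, pvGet2 T i j = pvDist l1 l2 i j) :
    ∀ fuel i j acc memo, i ≤ l1.length → j ≤ l2.length → pvGood l1 l2 memo →
      (pvBtB l1 l2 fuel i j acc memo).1 = pvBtA l1 l2 T fuel i j acc ∧
      pvGood l1 l2 (pvBtB l1 l2 fuel i j acc memo).2 := by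
  intro fuel
  induction fuel with
  | zero => intro i j acc memo _ _ hG; exact ⟨rfl, hG⟩
  | succ fuel ih =>
    intro i j acc memo hi hj hG
    have t1 : pvGet2 T i j = pvDist l1 l2 i j := htab _ hi _ hj
    have t2 : pvGet2 T (i-1) (j-1) = pvDist l1 l2 (i-1) (j-1) := htab _ (by omega) _ (by omega)
    have t3 : pvGet2 T i (j-1) = pvDist l1 l2 i (j-1) := htab _ hi _ (by omega)
    have t4 : pvGet2 T (i-1) j = pvDist l1 l2 (i-1) j := htab _ (by omega) _ hj
    obtain ⟨e1, g1⟩ := pvDistM_good l1 l2 (i+j) i j le_rfl memo hG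
    obtain ⟨e2, g2⟩ := pvDistM_good l1 l2 (i+j) (i-1) (j-1) (by omega) _ g1
    obtain ⟨e3, g3⟩ := pvDistM_good l1 l2 (i+j) i (j-1) (by omega) _ g2
    obtain ⟨e4, g4⟩ := pvDistM_good l1 l2 (i+j) (i-1) j (by omega) _ g3
    simp only [pvBtA, pvBtB, t1, t2, t3, t4, e1, e2, e3, e4]
    split_ifs <;> first
      | exact ⟨rfl, hG⟩
      | exact ih _ _ _ _ (by omega) (by omega) hG
      | exact ih _ _ _ _ (by omega) (by omega) g4

theorem pvGood_empty (l1 l2 : List Char) : pvGood l1 l2 PySem.Dict.empty := by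
  intro i j v h
  rw [PySem.Dict.get?_empty] at h
  cases h

-- ===== VERDICT (by name: the statement is the Claim_ definition above) =====
theorem minOperations_with_steps_spec : Claim_equal_minOperations_with_steps := by
  intro s1 s2 _
  unfold Spec_minOperations_with_steps minOperations_with_steps minOperations_with_steps_alt
  simp only
  obtain ⟨hops, hmemo⟩ := pvBt_eq s1.toList s2.toList _ (pvTable_eq_dist s1.toList s2.toList)
    (s1.toList.length + s2.toList.length) s1.toList.length s2.toList.length []
    PySem.Dict.empty le_rfl le_rfl (pvGood_empty s1.toList s2.toList)
  obtain ⟨hd, -⟩ := pvDistM_good s1.toList s2.toList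
    (s1.toList.length + s2.toList.length) s1.toList.length s2.toList.length le_rfl _ hmemo
  refine Prod.ext ?_ ?_
  · simp only [hd]
    exact (pvTable_eq_dist s1.toList s2.toList _ le_rfl _ le_rfl).symm ▸
      (pvTable_eq_dist s1.toList s2.toList _ le_rfl _ le_rfl)
  · simp only [hops]
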